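-- pv_equiv track=rewrite | github.com/AjayJoshi99/Competitive_Pragramming | Medium/Maximum Tip Calculator/maximum-tip-calculator.py | maxTip
-- ===== SOURCE A (Python) =====
-- from typing import List
--
-- def maxTip(n : int, x : int, y : int, arr : List[int], brr : List[int]) -> int:
--     diff = []
--     for i in range(n):
--         diff.append((abs(arr[i]-brr[i]), i))
--     tip = 0
--     diff.sort(reverse=True)
--     for i in range(n):
--         index = diff[i][1]
--         if (arr[index]>brr[index] or y<=0) and x>0:
--             tip += arr[index]
--             x -= 1
--         else:
--             tip += brr[index]
--             y -= 1
--     return tip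
-- ===== SOURCE B (Python) =====
-- def maxTip(n, x, y, arr, brr):
--     pending = [(arr[i], brr[i], i) for i in range(n)]
--     tip = 0
--     while pending:
--         best = max(pending, key=lambda t: (abs(t[0] - t[1]), t[2]))
--         pending.remove(best)
--         a, b, _ = best
--         if (a > b or y <= 0) and x > 0:
--             tip += a
--             x -= 1
--         else:
--             tip += b
--             y -= 1
--     return tip
-- ===== Notes on version B (the rewrite author's own statement) =====
-- stated objective: alternative
-- what changed: B never builds a sorted list: it keeps the undecided tasks as (a, b, i) triples and repeatedly extracts the maximum by (|a-b|, i) with max()+remove(), deciding each task as it is extracted, instead of A's sort-by-difference followed by an index-driven scan.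
import Mathlib
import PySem

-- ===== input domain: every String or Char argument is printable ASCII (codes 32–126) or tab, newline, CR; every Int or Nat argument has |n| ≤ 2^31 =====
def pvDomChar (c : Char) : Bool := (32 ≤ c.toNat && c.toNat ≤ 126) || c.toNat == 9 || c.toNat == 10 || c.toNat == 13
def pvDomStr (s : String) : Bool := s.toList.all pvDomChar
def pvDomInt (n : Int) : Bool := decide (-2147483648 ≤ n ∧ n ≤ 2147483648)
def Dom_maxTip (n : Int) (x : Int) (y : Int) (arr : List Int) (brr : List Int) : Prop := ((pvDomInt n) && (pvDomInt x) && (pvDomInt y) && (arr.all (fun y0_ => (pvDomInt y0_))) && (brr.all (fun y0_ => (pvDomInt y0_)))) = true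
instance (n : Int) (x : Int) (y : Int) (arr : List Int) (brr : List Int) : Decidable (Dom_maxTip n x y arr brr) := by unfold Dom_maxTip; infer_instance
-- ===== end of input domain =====

-- B replaces A's sort-then-scan with nested scans: repeated max-extraction (max + remove)
-- deciding each task as it is extracted; no sorted list is ever built (objective: alternative).

-- ===== PORT A =====
def maxTip (n : Int) (x : Int) (y : Int) (arr : List Int) (brr : List Int) : Int :=
  -- diff = []; for i in range(n): diff.append((abs(arr[i]-brr[i]), i))
  let diff : List (Int × Int) :=
    (PySem.List.pyRange 0 n 1).foldl
      (fun acc i => acc ++ [(|PySem.List.pyGetD arr i 0 - PySem.List.pyGetD brr i 0|, i)]) []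
  -- diff.sort(reverse=True)  (2-tuples of ints: lexicographic, descending)
  let diffS := PySem.List.sorted2 diff (fun p => p.1) (fun p => p.2) true
  -- tip = 0; for i in range(n): …
  let res : Int × Int × Int :=
    (PySem.List.pyRange 0 n 1).foldl
      (fun st i =>
        let index := (PySem.List.pyGetD diffS i ((0 : Int), (0 : Int))).2
        if (PySem.List.pyGetD arr index 0 > PySem.List.pyGetD brr index 0 ∨ st.2.1 ≤ 0) ∧ st.1 > 0 then
          (st.1 - 1, st.2.1, st.2.2 + PySem.List.pyGetD arr index 0)
        else
          (st.1, st.2.1 - 1, st.2.2 + PySem.List.pyGetD brr index 0))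
      (x, y, 0)
  res.2.2

-- ===== PORT B =====
-- the while-loop of Source B: best = max(pending, key=…); pending.remove(best); decide on best
def pvBLoop (pending : List (Int × Int × Int)) (x y tip : Int) : Int :=
  match PySem.List.max2? pending (fun t => |t.1 - t.2.1|) (fun t => t.2.2) with
  | none => tip          -- while pending: — empty, loop ends
  | some m =>
    match hr : PySem.List.remove? pending m with
    | none => tip        -- unreachable: max(pending) ∈ pending, so list.remove cannot raise
    | some rest =>
      if (m.1 > m.2.1 ∨ y ≤ 0) ∧ x > 0 then pvBLoop rest (x - 1) y (tip + m.1)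
      else pvBLoop rest x (y - 1) (tip + m.2.1)
termination_by pending.length
decreasing_by
  all_goals
    (have hmem : m ∈ pending := by
        by_contra hc
        rw [(PySem.List.remove?_eq_none_iff pending m).mpr hc] at hr
        simp at hr
     have he : rest = pending.erase m := by
        rw [PySem.List.remove?_eq_some_erase pending m hmem] at hr
        exact (Option.some.inj hr).symm
     have hl : pending.length ≠ 0 := by
        intro h0
        rw [List.eq_nil_of_length_eq_zero h0] at hmem
        exact absurd hmem (List.not_mem_nil)
     rw [he, List.length_erase_of_mem hmem]
     omega)

def maxTip_alt (n : Int) (x : Int) (y : Int) (arr : List Int) (brr : List Int) : Int :=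
  -- pending = [(arr[i], brr[i], i) for i in range(n)]; tip = 0; while pending: …
  pvBLoop
    ((PySem.List.pyRange 0 n 1).map
      (fun i => (PySem.List.pyGetD arr i 0, PySem.List.pyGetD brr i 0, i)))
    x y 0

-- ===== PRECONDITION & SPEC =====
-- Pre_ excludes exactly the inputs on which A raises IndexError: n larger than either list.
def Pre_maxTip (n : Int) (x : Int) (y : Int) (arr : List Int) (brr : List Int) : Prop :=
  n ≤ (arr.length : Int) ∧ n ≤ (brr.length : Int)
instance (n : Int) (x : Int) (y : Int) (arr : List Int) (brr : List Int) : Decidable (Pre_maxTip n x y arr brr) := by unfold Pre_maxTip; infer_instance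

def pvWitness_maxTip : Int × Int × Int × List Int × List Int := (2, 1, 1, [3, 1], [2, 5])

def Spec_maxTip (n : Int) (x : Int) (y : Int) (arr : List Int) (brr : List Int) (out : Int) : Prop := out = maxTip_alt n x y arr brr
instance (n : Int) (x : Int) (y : Int) (arr : List Int) (brr : List Int) (out : Int) : Decidable (Spec_maxTip n x y arr brr out) := by unfold Spec_maxTip; infer_instance

-- ===== CLAIM (what is proved, stated in full; the proofs are below) =====
def Claim_equal_maxTip : Prop := ∀ (n : Int) (x : Int) (y : Int) (arr : List Int) (brr : List Int), Dom_maxTip n x y arr brr → Pre_maxTip n x y arr brr → Spec_maxTip n x y arr brr (maxTip n x y arr brr)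

-- ===== LEMMAS AND PROOFS =====

-- the strict "comes before, descending" test sorted2/max2? both use on B's triples (a, b, i)
def pvLt (s t : Int × Int × Int) : Bool :=
  decide (|s.1 - s.2.1| < |t.1 - t.2.1|) ||
    (!decide (|t.1 - t.2.1| < |s.1 - s.2.1|) && decide (s.2.2 < t.2.2))

theorem pvLt_asymm {s t : Int × Int × Int} (h : pvLt s t = true) : pvLt t s = false := by
  simp [pvLt] at *; omega

theorem pvLt_le_trans {s t u : Int × Int × Int} (h1 : pvLt s t = false) (h2 : pvLt t u = false) :
    pvLt s u = false := by
  simp [pvLt] at *; omega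

theorem pvLt_of_ge_of_ne {s t : Int × Int × Int} (h : pvLt s t = false) (hne : s.2.2 ≠ t.2.2) :
    pvLt t s = true := by
  simp [pvLt] at *; omega

-- max2? on a nonempty list returns a member that no element strictly beats
theorem pvMax2_go (l : List (Int × Int × Int)) (m0 : Int × Int × Int) :
    ∃ m, l.foldl
        (fun acc x => match acc with
          | none => some x
          | some m => if pvLt m x then some x else some m)
        (some m0) = some m
      ∧ (m = m0 ∨ m ∈ l) ∧ (∀ z ∈ l, pvLt m z = false) ∧ pvLt m m0 = false := by
  induction l generalizing m0 with
  | nil =>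
      refine ⟨m0, rfl, Or.inl rfl, by simp, ?_⟩
      cases h : pvLt m0 m0 with
      | false => rfl
      | true => exact absurd (pvLt_asymm h) (by simp [h])
  | cons a l ih =>
      by_cases h : pvLt m0 a = true
      · obtain ⟨m, hm, hmem, hall, hle⟩ := ih a
        refine ⟨m, by simpa [h] using hm, ?_, ?_, ?_⟩
        · rcases hmem with rfl | hz
          · exact Or.inr List.mem_cons_self
          · exact Or.inr (List.mem_cons_of_mem _ hz)
        · intro z hz
          rw [List.mem_cons] at hz
          rcases hz with rfl | hz
          · exact hle
          · exact hall _ hz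
        · exact pvLt_le_trans hle (pvLt_asymm h)
      · obtain ⟨m, hm, hmem, hall, hle⟩ := ih m0
        rw [Bool.not_eq_true] at h
        refine ⟨m, by simpa [h] using hm, ?_, ?_, hle⟩
        · rcases hmem with rfl | hz
          · exact Or.inl rfl
          · exact Or.inr (List.mem_cons_of_mem _ hz)
        · intro z hz
          rw [List.mem_cons] at hz
          rcases hz with rfl | hz
          · exact pvLt_le_trans hle h
          · exact hall _ hz

theorem pvMax2_spec (a : Int × Int × Int) (l : List (Int × Int × Int)) :
    ∃ m, PySem.List.max2? (a :: l) (fun t => |t.1 - t.2.1|) (fun t => t.2.2) = some m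
      ∧ m ∈ a :: l ∧ ∀ z ∈ a :: l, pvLt m z = false := by
  obtain ⟨m, hm, hmem, hall, hle⟩ := pvMax2_go l a
  refine ⟨m, ?_, ?_, ?_⟩
  · have hstep : PySem.List.max2? (a :: l) (fun t => |t.1 - t.2.1|) (fun t => t.2.2)
        = l.foldl
            (fun acc x => match acc with
              | none => some x
              | some m => if pvLt m x then some x else some m)
            (some a) := by
      show List.foldl _ (some a) l = _
      congr 1
      funext acc z
      cases acc <;> simp [pvLt]
    rw [hstep, hm]
  · rcases hmem with rfl | h
    · exact List.mem_cons_self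
    · exact List.mem_cons_of_mem _ h
  · intro z hz
    rw [List.mem_cons] at hz
    rcases hz with rfl | hz
    · exact hle
    · exact hall _ hz

-- sorted2 (reverse=True) unfolded to its insertion fold with the pvLt ordering
theorem pvSorted2_eq (l : List (Int × Int × Int)) :
    PySem.List.sorted2 l (fun t => |t.1 - t.2.1|) (fun t => t.2.2) true
      = l.foldl (fun acc x => PySem.List.insertBy (fun a b => pvLt b a) x acc) [] := rfl

theorem pvInsertBy_pairwise (x : Int × Int × Int) (acc : List (Int × Int × Int))
    (h : acc.Pairwise (fun a b => pvLt a b = false)) :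
    (PySem.List.insertBy (fun a b => pvLt b a) x acc).Pairwise (fun a b => pvLt a b = false) := by
  induction acc with
  | nil => simp [PySem.List.insertBy]
  | cons a t ih =>
      rw [List.pairwise_cons] at h
      simp only [PySem.List.insertBy]
      by_cases hb : pvLt a x = true
      · rw [if_pos hb]
        refine List.Pairwise.cons ?_ (List.Pairwise.cons h.1 h.2)
        intro z hz
        rw [List.mem_cons] at hz
        rcases hz with rfl | hz
        · exact pvLt_asymm hb
        · exact pvLt_le_trans (pvLt_asymm hb) (h.1 _ hz)
      · rw [if_neg hb]
        refine List.Pairwise.cons ?_ (ih h.2)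
        intro z hz
        rcases (PySem.List.mem_insertBy _ x z t).mp hz with rfl | hz
        · exact Bool.not_eq_true _ ▸ hb
        · exact h.1 _ hz

theorem pvSortFold_pairwise (l acc : List (Int × Int × Int))
    (h : acc.Pairwise (fun a b => pvLt a b = false)) :
    (l.foldl (fun acc x => PySem.List.insertBy (fun a b => pvLt b a) x acc) acc).Pairwise
      (fun a b => pvLt a b = false) := by
  induction l generalizing acc with
  | nil => exact h
  | cons a l ih => exact ih _ (pvInsertBy_pairwise a acc h)

theorem pvSorted2_pairwise (l : List (Int × Int × Int)) :
    (PySem.List.sorted2 l (fun t => |t.1 - t.2.1|) (fun t => t.2.2) true).Pairwise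
      (fun a b => pvLt a b = false) := by
  rw [pvSorted2_eq]
  exact pvSortFold_pairwise l [] (by simp)

-- strict descending pairwise, given pairwise-distinct third components
theorem pvPairwise_strict (L : List (Int × Int × Int))
    (hnd : (L.map (fun t => t.2.2)).Nodup)
    (hw : L.Pairwise (fun a b => pvLt a b = false)) :
    L.Pairwise (fun a b => pvLt b a = true) := by
  have hne : L.Pairwise (fun a b => a.2.2 ≠ b.2.2) := List.pairwise_map.mp hnd
  exact (hw.and hne).imp (fun h => pvLt_of_ge_of_ne h.1 h.2)

-- the head of the descending sort is the (unique) max; the tail sorts the rest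
theorem pvSorted2_cons_max (l : List (Int × Int × Int))
    (hnd : (l.map (fun t => t.2.2)).Nodup) (m : Int × Int × Int)
    (hmem : m ∈ l) (hmax : ∀ z ∈ l, pvLt m z = false) :
    PySem.List.sorted2 l (fun t => |t.1 - t.2.1|) (fun t => t.2.2) true
      = m :: PySem.List.sorted2 (l.erase m) (fun t => |t.1 - t.2.1|) (fun t => t.2.2) true := by
  have hinj := List.inj_on_of_nodup_map hnd
  have hndl : l.Nodup := List.Nodup.of_map _ hnd
  have hperm1 : (PySem.List.sorted2 l (fun t => |t.1 - t.2.1|) (fun t => t.2.2) true).Perm l :=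
    PySem.List.sorted2_perm ..
  have hperm2 :
      (m :: PySem.List.sorted2 (l.erase m) (fun t => |t.1 - t.2.1|) (fun t => t.2.2) true).Perm l := by
    refine List.Perm.trans (List.Perm.cons m (PySem.List.sorted2_perm ..)) ?_
    exact (List.perm_cons_erase hmem).symm
  -- both lists are strictly descending, hence equal as permutations of l
  have hs1 : (PySem.List.sorted2 l (fun t => |t.1 - t.2.1|) (fun t => t.2.2) true).Pairwise
      (fun a b => pvLt b a = true) := by
    refine pvPairwise_strict _ ?_ (pvSorted2_pairwise l)
    exact (hperm1.map (fun t => t.2.2)).nodup_iff.mpr hnd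
  have hndE : ((l.erase m).map (fun t => t.2.2)).Nodup :=
    List.Nodup.sublist (List.Sublist.map _ List.erase_sublist) hnd
  have hs2 : (m :: PySem.List.sorted2 (l.erase m) (fun t => |t.1 - t.2.1|) (fun t => t.2.2) true).Pairwise
      (fun a b => pvLt b a = true) := by
    rw [List.pairwise_cons]
    constructor
    · intro z hz
      have hz' : z ∈ l.erase m := ((PySem.List.sorted2_perm ..).mem_iff).mp hz
      have hzl : z ≠ m ∧ z ∈ l := (hndl.mem_erase_iff).mp hz'
      refine pvLt_of_ge_of_ne (hmax _ hzl.2) ?_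
      intro hEq
      exact hzl.1 (hinj hzl.2 hmem hEq.symm)
    · refine pvPairwise_strict _ ?_ (pvSorted2_pairwise _)
      have hp : (PySem.List.sorted2 (l.erase m) (fun t => |t.1 - t.2.1|) (fun t => t.2.2) true).Perm
          (l.erase m) := PySem.List.sorted2_perm ..
      exact ((hp.map (fun t => t.2.2)).nodup_iff).mpr hndE
  refine List.Perm.eq_of_pairwise ?_ hs1 hs2 (hperm1.trans hperm2.symm)
  intro a b _ _ h1 h2
  exact absurd h1 (by simp [pvLt_asymm h2])

-- the decision step on a triple (a, b, i), on state (x, y, tip)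
def pvStep (st : Int × Int × Int) (t : Int × Int × Int) : Int × Int × Int :=
  if (t.1 > t.2.1 ∨ st.2.1 ≤ 0) ∧ st.1 > 0 then (st.1 - 1, st.2.1, st.2.2 + t.1)
  else (st.1, st.2.1 - 1, st.2.2 + t.2.1)

-- B's extraction loop computes the fold of the decision step over the descending sort
theorem pvBLoop_eq_foldl (N : Nat) :
    ∀ (l : List (Int × Int × Int)), l.length ≤ N →
      (l.map (fun t => t.2.2)).Nodup → ∀ (x y tip : Int),
      pvBLoop l x y tip
        = ((PySem.List.sorted2 l (fun t => |t.1 - t.2.1|) (fun t => t.2.2) true).foldl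
            pvStep (x, y, tip)).2.2 := by
  induction N with
  | zero =>
      intro l hl _ x y tip
      rw [List.length_eq_zero_iff.mp (Nat.le_zero.mp hl)]
      rw [pvBLoop]
      rfl
  | succ N ih =>
      intro l hl hnd x y tip
      cases l with
      | nil =>
          rw [pvBLoop]
          rfl
      | cons a t =>
          obtain ⟨m, hm, hmem, hmax⟩ := pvMax2_spec a t
          have hrem : PySem.List.remove? (a :: t) m = some ((a :: t).erase m) :=
            PySem.List.remove?_eq_some_erase _ m hmem
          have hson := pvSorted2_cons_max (a :: t) hnd m hmem hmax
          have hndE : (((a :: t).erase m).map (fun s => s.2.2)).Nodup :=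
            List.Nodup.sublist (List.Sublist.map _ List.erase_sublist) hnd
          have hlen : ((a :: t).erase m).length ≤ N := by
            rw [List.length_erase_of_mem hmem]
            simp at hl ⊢
            omega
          rw [pvBLoop]
          split
          · next heq => rw [hm] at heq; exact absurd heq (by simp)
          · next m' heq =>
              rw [hm] at heq
              obtain rfl : m = m' := Option.some.inj heq
              split
              · next hr => rw [hrem] at hr; exact absurd hr (by simp)
              · next rest hr =>
                  rw [hrem] at hr
                  obtain rfl : (a :: t).erase m = rest := Option.some.inj hr
                  rw [hson]
                  simp only [List.foldl_cons]
                  by_cases hc : (m.1 > m.2.1 ∨ y ≤ 0) ∧ x > 0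
                  · rw [if_pos hc, ih _ hlen hndE]
                    simp only [pvStep, if_pos hc]
                  · rw [if_neg hc, ih _ hlen hndE]
                    simp only [pvStep, if_neg hc]

-- A-side: link the sorted (diff, index) pairs to the sorted triples via the projection
def pvProj (t : Int × Int × Int) : Int × Int := (|t.1 - t.2.1|, t.2.2)

theorem pvInsertBy_map (bef : Int × Int → Int × Int → Bool) (r : Int × Int × Int)
    (acc : List (Int × Int × Int)) :
    (PySem.List.insertBy (fun a b => bef (pvProj a) (pvProj b)) r acc).map pvProj
      = PySem.List.insertBy bef (pvProj r) (acc.map pvProj) := by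
  induction acc with
  | nil => simp [PySem.List.insertBy]
  | cons h t ih =>
      simp only [PySem.List.insertBy, List.map_cons]
      by_cases hb : bef (pvProj r) (pvProj h)
      · simp [hb]
      · simp [hb, ih]

theorem pvFoldl_insertBy_map (bef : Int × Int → Int × Int → Bool)
    (l acc : List (Int × Int × Int)) :
    (l.foldl (fun acc r => PySem.List.insertBy (fun a b => bef (pvProj a) (pvProj b)) r acc) acc).map pvProj
      = (l.map pvProj).foldl (fun acc p => PySem.List.insertBy bef p acc) (acc.map pvProj) := by
  induction l generalizing acc with
  | nil => rfl
  | cons h t ih =>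
      simp only [List.foldl_cons, List.map_cons]
      rw [← pvInsertBy_map]
      exact ih _

theorem pvSorted_map (l : List (Int × Int × Int)) :
    PySem.List.sorted2 (l.map pvProj) (fun p => p.1) (fun p => p.2) true
      = (PySem.List.sorted2 l (fun t => |t.1 - t.2.1|) (fun t => t.2.2) true).map pvProj := by
  exact (pvFoldl_insertBy_map
    (fun p q => decide (q.1 < p.1) || (!decide (p.1 < q.1) && decide (q.2 < p.2))) l []).symm

-- ===== VERDICT (by name: the statement is the Claim_ definition above) =====
theorem maxTip_spec : Claim_equal_maxTip := by
  intro n x y arr brr _ hpre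
  obtain ⟨ha, hb⟩ := hpre
  unfold Spec_maxTip
  by_cases hn : n ≤ 0
  · have h1 : maxTip n x y arr brr = 0 := by
      simp [maxTip, PySem.List.pyRange_one_eq_nil hn]
    have h2 : maxTip_alt n x y arr brr = 0 := by
      unfold maxTip_alt
      rw [PySem.List.pyRange_one_eq_nil hn]
      rw [pvBLoop]
      rfl
    rw [h1, h2]
  · replace hn : 0 < n := by omega
    set pending : List (Int × Int × Int) :=
      (PySem.List.pyRange 0 n 1).map
        (fun i => (PySem.List.pyGetD arr i 0, PySem.List.pyGetD brr i 0, i)) with hpend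
    have hidx : pending.map (fun t => t.2.2) = PySem.List.pyRange 0 n 1 := by
      rw [hpend, List.map_map]
      exact List.map_id _
    have hnd : (pending.map (fun t => t.2.2)).Nodup := by
      rw [hidx]
      have hcast : ((n.toNat : Int)) = n := Int.toNat_of_nonneg (le_of_lt hn)
      rw [← hcast, PySem.List.pyRange_zero_natCast]
      exact List.Nodup.map (fun a b h => by exact_mod_cast h) List.nodup_range
    set S := PySem.List.sorted2 pending (fun t => |t.1 - t.2.1|) (fun t => t.2.2) true with hS
    have hmemS : ∀ r ∈ S,
        PySem.List.pyGetD arr r.2.2 0 = r.1 ∧ PySem.List.pyGetD brr r.2.2 0 = r.2.1 := by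
      intro r hr
      have hr2 : r ∈ pending := (PySem.List.sorted2_perm ..).mem_iff.mp hr
      rw [hpend, List.mem_map] at hr2
      obtain ⟨j, _, rfl⟩ := hr2
      exact ⟨rfl, rfl⟩
    have hdiff : (PySem.List.pyRange 0 n 1).map
          (fun i => (|PySem.List.pyGetD arr i 0 - PySem.List.pyGetD brr i 0|, i))
        = pending.map pvProj := by
      rw [hpend, List.map_map]
      rfl
    have hSlen : (((S.map pvProj).length : Nat) : Int) = n := by
      have h1 : S.length = pending.length := (PySem.List.sorted2_perm ..).length_eq
      rw [List.length_map, h1, hpend, List.length_map, PySem.List.length_pyRange_one]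
      omega
    -- evaluate A to the fold of pvStep over S
    have hA : maxTip n x y arr brr = (S.foldl pvStep (x, y, 0)).2.2 := by
      unfold maxTip
      simp only [PySem.List.foldl_append_singleton_eq_map, List.nil_append]
      rw [hdiff, pvSorted_map, ← hS]
      rw [← hSlen, PySem.List.foldl_pyRange_zero_pyGetD' (S.map pvProj) ((0 : Int), (0 : Int))
        (fun st p => if (PySem.List.pyGetD arr p.2 0 > PySem.List.pyGetD brr p.2 0 ∨ st.2.1 ≤ 0) ∧ st.1 > 0
          then (st.1 - 1, st.2.1, st.2.2 + PySem.List.pyGetD arr p.2 0)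
          else (st.1, st.2.1 - 1, st.2.2 + PySem.List.pyGetD brr p.2 0)) (x, y, 0)]
      rw [List.foldl_map]
      rw [PySem.List.foldl_congr_mem S _ pvStep _
        (by
          intro acc r hr
          obtain ⟨h1, h2⟩ := hmemS r hr
          simp only [pvProj, h1, h2, pvStep])]
    -- evaluate B to the same fold
    have hB : maxTip_alt n x y arr brr = (S.foldl pvStep (x, y, 0)).2.2 := by
      unfold maxTip_alt
      rw [← hpend, pvBLoop_eq_foldl pending.length pending le_rfl hnd, ← hS]
    rw [hA, hB]
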